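-- pv_equiv track=rewrite | github.com/flume08/Proyecto-AyP | GestionVE.py | is_undulating
-- ===== SOURCE A (Python) =====
-- def is_undulating(id):
--     if len((id)) > 0:
--         for i in range(len((id))-2):
--             if id[i] < id[i+1] and id[i+1] > id[i+2]:
--                 continue
--             elif id[i] > id[i+1] and id[i+1] < id[i+2]:
--                 continue
--             else:
--                 return False
--     else:
--         return False
--     return True
-- ===== SOURCE B (Python) =====
-- def _zigzag(pairs, up):
--     # one phase pattern: directions must be up, down, up, ... (or the reverse)
--     cur = up
--     for a, b in pairs:
--         if not (a < b if cur else a > b):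
--             return False
--         cur = not cur
--     return True
--
--
-- def is_undulating(id):
--     n = len(id)
--     if n == 0:
--         return False
--     if n <= 2:
--         return True
--     pairs = list(zip(id, id[1:]))
--     return _zigzag(pairs, True) or _zigzag(pairs, False)
-- ===== Notes on version B (the rewrite author's own statement) =====
-- stated objective: alternative
-- what changed: A checks every overlapping triple with two and-branches in one index loop; B instead handles lengths<=2 directly and then tries the two possible global phase patterns (start-up / start-down), each verified by a single pairwise scan over zip(id,id[1:]) with a direction flag that toggles at every step.
import Mathlib
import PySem

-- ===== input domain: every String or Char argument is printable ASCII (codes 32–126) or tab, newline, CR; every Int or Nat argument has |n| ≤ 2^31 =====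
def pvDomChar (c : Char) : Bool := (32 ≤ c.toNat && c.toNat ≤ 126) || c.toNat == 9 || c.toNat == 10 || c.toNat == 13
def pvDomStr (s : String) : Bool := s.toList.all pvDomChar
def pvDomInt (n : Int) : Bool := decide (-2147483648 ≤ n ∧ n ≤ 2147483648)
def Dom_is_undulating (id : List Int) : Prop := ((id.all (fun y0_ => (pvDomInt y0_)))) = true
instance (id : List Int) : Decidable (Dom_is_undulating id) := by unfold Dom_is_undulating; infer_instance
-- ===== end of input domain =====

-- B replaces A's per-triple two-branch index loop by trying the two global phase patterns
-- (start-up / start-down), each a single pairwise scan with a toggling direction flag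
-- (objective: alternative, same cost).

-- ===== PORT A =====
-- A's for-loop with early 'return False'; indices from range(len(id)-2) are always in
-- range, so pyGetD with default 0 is exact here
def goA (id : List Int) : List Int → Bool
  | [] => true
  | i :: rest =>
    if PySem.List.pyGetD id i 0 < PySem.List.pyGetD id (i+1) 0 ∧
       PySem.List.pyGetD id (i+1) 0 > PySem.List.pyGetD id (i+2) 0 then goA id rest
    else if PySem.List.pyGetD id i 0 > PySem.List.pyGetD id (i+1) 0 ∧
            PySem.List.pyGetD id (i+1) 0 < PySem.List.pyGetD id (i+2) 0 then goA id rest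
    else false

def is_undulating (id : List Int) : Bool :=
  if (id.length : Int) > 0 then
    goA id (PySem.List.pyRange 0 ((id.length : Int) - 2) 1)
  else false

-- ===== PORT B =====
-- _zigzag: the loop over the pair list with the toggling flag and early 'return False'
def zigzagB : List (Int × Int) → Bool → Bool
  | [], _ => true
  | (a, b) :: rest, cur =>
    if (if cur then a < b else a > b) then zigzagB rest (!cur) else false

def is_undulating_alt (id : List Int) : Bool :=
  if (id.length : Int) = 0 then false
  else if (id.length : Int) ≤ 2 then true
  else
    zigzagB (id.zip (PySem.List.slice id (some 1) none)) true ||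
    zigzagB (id.zip (PySem.List.slice id (some 1) none)) false

-- ===== PRECONDITION & SPEC =====
def Spec_is_undulating (id : List Int) (out : Bool) : Prop := out = is_undulating_alt id
instance (id : List Int) (out : Bool) : Decidable (Spec_is_undulating id out) := by unfold Spec_is_undulating; infer_instance

-- ===== CLAIM (what is proved, stated in full; the proofs are below) =====
def Claim_equal_is_undulating : Prop := ∀ (id : List Int), Dom_is_undulating id → Spec_is_undulating id (is_undulating id)

-- ===== LEMMAS AND PROOFS =====

-- proof-side characterisation of A: every overlapping triple alternates (structural form)
def triplesOK : List Int → Bool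
  | x :: y :: z :: rest =>
    (decide (x < y ∧ y > z) || decide (x > y ∧ y < z)) && triplesOK (y :: z :: rest)
  | _ => true

-- the per-index triple condition of A's loop, over Nat indices
def trip3 (l : List Int) (k : Nat) : Bool :=
  decide (l.getD k 0 < l.getD (k+1) 0 ∧ l.getD (k+1) 0 > l.getD (k+2) 0) ||
  decide (l.getD k 0 > l.getD (k+1) 0 ∧ l.getD (k+1) 0 < l.getD (k+2) 0)

-- A's early-return loop is List.all of its branch condition
theorem goA_eq_all (id : List Int) (l : List Int) :
    goA id l = l.all (fun i =>
      decide (PySem.List.pyGetD id i 0 < PySem.List.pyGetD id (i+1) 0 ∧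
              PySem.List.pyGetD id (i+1) 0 > PySem.List.pyGetD id (i+2) 0) ||
      decide (PySem.List.pyGetD id i 0 > PySem.List.pyGetD id (i+1) 0 ∧
              PySem.List.pyGetD id (i+1) 0 < PySem.List.pyGetD id (i+2) 0)) := by
  induction l with
  | nil => simp [goA]
  | cons i rest ih =>
    simp only [goA, List.all_cons, ih]
    by_cases h1 : PySem.List.pyGetD id i 0 < PySem.List.pyGetD id (i+1) 0 ∧
        PySem.List.pyGetD id (i+1) 0 > PySem.List.pyGetD id (i+2) 0
    · simp [h1]
    · by_cases h2 : PySem.List.pyGetD id i 0 > PySem.List.pyGetD id (i+1) 0 ∧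
          PySem.List.pyGetD id (i+1) 0 < PySem.List.pyGetD id (i+2) 0
      · simp [h1, h2]
      · simp [h1, h2]

-- the Int-indexed pyRange form of the loop equals the Nat-indexed trip3 form
theorem all_pyRange_eq_all_range (l : List Int) :
    (PySem.List.pyRange 0 ((l.length : Int) - 2) 1).all (fun i =>
      decide (PySem.List.pyGetD l i 0 < PySem.List.pyGetD l (i+1) 0 ∧
              PySem.List.pyGetD l (i+1) 0 > PySem.List.pyGetD l (i+2) 0) ||
      decide (PySem.List.pyGetD l i 0 > PySem.List.pyGetD l (i+1) 0 ∧
              PySem.List.pyGetD l (i+1) 0 < PySem.List.pyGetD l (i+2) 0)) =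
    (List.range (l.length - 2)).all (trip3 l) := by
  rw [PySem.List.pyRange_one, List.all_map]
  have ht : (((l.length : Int) - 2 - 0)).toNat = l.length - 2 := by omega
  rw [ht]
  congr 1
  funext k
  have e1 : (0 : Int) + (k : Int) = ((k : Nat) : Int) := by ring
  have e2 : (k : Int) + 1 = (((k + 1 : Nat)) : Int) := by push_cast; ring
  have e3 : (k : Int) + 2 = (((k + 2 : Nat)) : Int) := by push_cast; ring
  simp only [Function.comp, e1, e2, e3, PySem.List.pyGetD_natCast, trip3]

-- the Nat-indexed form equals the structural triplesOK
theorem all_range_eq_triplesOK (l : List Int) :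
    (List.range (l.length - 2)).all (trip3 l) = triplesOK l := by
  induction l with
  | nil => rfl
  | cons x t ih =>
    match t with
    | [] => rfl
    | [y] => rfl
    | y :: z :: rest =>
      have hlen : (x :: y :: z :: rest).length - 2 = rest.length + 1 := by simp
      rw [hlen, List.range_succ_eq_map, List.all_cons, List.all_map]
      have h0 : trip3 (x :: y :: z :: rest) 0 =
          (decide (x < y ∧ y > z) || decide (x > y ∧ y < z)) := by
        simp [trip3]
      have hall : (List.range rest.length).all ((fun k => trip3 (x :: y :: z :: rest) k) ∘ Nat.succ) =
          (List.range ((y :: z :: rest).length - 2)).all (trip3 (y :: z :: rest)) := by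
        have hl2 : (y :: z :: rest).length - 2 = rest.length := by simp
        rw [hl2]
        have hshift : ((fun k => trip3 (x :: y :: z :: rest) k) ∘ Nat.succ) =
            trip3 (y :: z :: rest) := by
          funext k
          simp [trip3, Function.comp, Nat.succ_eq_add_one]
        rw [hshift]
      rw [h0, hall, ih]
      rfl

-- consecutive pairs of a list, as built by B
def pvPairs (l : List Int) : List (Int × Int) := l.zip (PySem.List.slice l (some 1) none)

theorem pvPairs_cons (x y : Int) (r : List Int) :
    pvPairs (x :: y :: r) = (x, y) :: pvPairs (y :: r) := by
  simp [pvPairs, PySem.List.slice_from]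

-- when the first step has the phase's direction, triplesOK equals the phase scan
theorem triplesOK_eq_zigzag (r : List Int) :
    ∀ (x y : Int) (cur : Bool), (if cur then x < y else x > y) →
      triplesOK (x :: y :: r) = zigzagB (pvPairs (x :: y :: r)) cur := by
  induction r with
  | nil =>
    intro x y cur h
    have : zigzagB (pvPairs [x, y]) cur = true := by
      rw [pvPairs_cons]
      simp only [pvPairs, zigzagB, if_pos h]
      rfl
    rw [this]; rfl
  | cons z rs ih =>
    intro x y cur h
    rw [pvPairs_cons]
    have hstep : zigzagB ((x, y) :: pvPairs (y :: z :: rs)) cur =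
        zigzagB (pvPairs (y :: z :: rs)) (!cur) := by
      simp only [zigzagB, if_pos h]
    rw [hstep]
    by_cases hyz : (if !cur then y < z else y > z)
    · rw [← ih y z (!cur) hyz]
      have hfac : (decide (x < y ∧ y > z) || decide (x > y ∧ y < z)) = true := by
        clear ih; cases cur <;> simp_all
      show ((decide (x < y ∧ y > z) || decide (x > y ∧ y < z)) && triplesOK (y :: z :: rs)) = _
      rw [hfac, Bool.true_and]
    · have h1 : (decide (x < y ∧ y > z) || decide (x > y ∧ y < z)) = false := by
        clear ih; cases cur <;> simp_all <;> omega
      have h2 : zigzagB (pvPairs (y :: z :: rs)) (!cur) = false := by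
        rw [pvPairs_cons]
        simp only [zigzagB, if_neg hyz]
      show ((decide (x < y ∧ y > z) || decide (x > y ∧ y < z)) && triplesOK (y :: z :: rs)) = _
      rw [h1, h2, Bool.false_and]

-- when the first step does not have the phase's direction, the phase scan fails at once
theorem zigzag_false (x y : Int) (r : List Int) (cur : Bool)
    (h : ¬ (if cur then x < y else x > y)) :
    zigzagB (pvPairs (x :: y :: r)) cur = false := by
  rw [pvPairs_cons]
  simp only [zigzagB, if_neg h]

-- ===== VERDICT (by name: the statement is the Claim_ definition above) =====
theorem is_undulating_spec : Claim_equal_is_undulating := by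
  intro id _
  unfold Spec_is_undulating
  match id with
  | [] => rfl
  | [x] =>
    show is_undulating [x] = is_undulating_alt [x]
    simp [is_undulating, is_undulating_alt, goA, PySem.List.pyRange_one_eq_nil]
  | [x, y] =>
    show is_undulating [x, y] = is_undulating_alt [x, y]
    simp [is_undulating, is_undulating_alt, goA, PySem.List.pyRange_one_eq_nil]
  | x :: y :: z :: rest =>
    have hlen3 : (x :: y :: z :: rest).length = rest.length + 3 := by simp
    have hA : is_undulating (x :: y :: z :: rest) = triplesOK (x :: y :: z :: rest) := by
      unfold is_undulating
      rw [if_pos (by rw [hlen3]; push_cast; omega)]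
      rw [goA_eq_all, all_pyRange_eq_all_range, all_range_eq_triplesOK]
    have hB : is_undulating_alt (x :: y :: z :: rest) =
        (zigzagB (pvPairs (x :: y :: z :: rest)) true ||
         zigzagB (pvPairs (x :: y :: z :: rest)) false) := by
      unfold is_undulating_alt
      rw [if_neg (by rw [hlen3]; push_cast; omega),
          if_neg (by rw [hlen3]; push_cast; omega)]
      rfl
    rw [hA, hB]
    rcases lt_trichotomy x y with hxy | hxy | hxy
    · rw [triplesOK_eq_zigzag (z :: rest) x y true (by simpa using hxy),
          zigzag_false x y (z :: rest) false (by simp; omega), Bool.or_false]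
    · have h1 : zigzagB (pvPairs (x :: y :: z :: rest)) true = false :=
        zigzag_false x y (z :: rest) true (by simp [hxy])
      have h2 : zigzagB (pvPairs (x :: y :: z :: rest)) false = false :=
        zigzag_false x y (z :: rest) false (by simp [hxy])
      have h3 : triplesOK (x :: y :: z :: rest) = false := by
        show ((decide (x < y ∧ y > z) || decide (x > y ∧ y < z)) && triplesOK (y :: z :: rest)) = false
        simp [hxy]
      rw [h1, h2, h3, Bool.or_false]
    · rw [triplesOK_eq_zigzag (z :: rest) x y false (by simpa using hxy),
          zigzag_false x y (z :: rest) true (by simp; omega), Bool.false_or]
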